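-- pv_equiv track=rewrite | github.com/plasoc/axiplasma | misc/gencross.py | get_formatted_wrapper_signals
-- ===== SOURCE A (Python) =====
-- def get_formatted_wrapper_signals(names,ismaster=True,ntabs=1,issignals=False):
-- 	if ismaster:
-- 		f0 = '_m_'
-- 		f1 = ' out '
-- 		f2 = ' in '
-- 		f3 = '(clogb2(axi_slave_amount+1)+axi_slave_id_width)'
-- 	else:
-- 		f0 = '_s_'
-- 		f1 = ' in '
-- 		f2 = ' out '
-- 		f3 = 'axi_slave_id_width'
-- 	f4 = ''.join(['\t'for _ in range(ntabs)])
-- 	if issignals: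
-- 		f5 = 'signal '
-- 		f1 = ''
-- 		f2 = ''
-- 	else:
-- 		f5 = ''
-- 	formatted_signals = []
-- 	for name in names:
-- 		lines = \
-- 		[\
-- 			f4+f5+name+f0+'axi_awid : '+f1+' std_logic_vector('+f3+'-1 downto 0);\n',\
-- 			f4+f5+name+f0+'axi_awaddr : '+f1+' std_logic_vector(axi_address_width-1 downto 0);\n',\
-- 			f4+f5+name+f0+'axi_awlen : '+f1+' std_logic_vector(7 downto 0);\n',\
-- 			f4+f5+name+f0+'axi_awsize : '+f1+' std_logic_vector(2 downto 0);\n',\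
-- 			f4+f5+name+f0+'axi_awburst : '+f1+' std_logic_vector(1 downto 0);\n',\
-- 			f4+f5+name+f0+'axi_awlock : '+f1+' std_logic;\n',\
-- 			f4+f5+name+f0+'axi_awcache : '+f1+' std_logic_vector(3 downto 0);\n',\
-- 			f4+f5+name+f0+'axi_awprot : '+f1+' std_logic_vector(2 downto 0);\n',\
-- 			f4+f5+name+f0+'axi_awqos : '+f1+' std_logic_vector(3 downto 0);\n',\
-- 			f4+f5+name+f0+'axi_awregion : '+f1+' std_logic_vector(3 downto 0);\n',\
-- 			f4+f5+name+f0+'axi_awvalid : '+f1+' std_logic;\n',\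
-- 			f4+f5+name+f0+'axi_awready : '+f2+' std_logic;\n',\
-- 			f4+f5+name+f0+'axi_wdata : '+f1+' std_logic_vector(axi_data_width-1 downto 0);\n',\
-- 			f4+f5+name+f0+'axi_wstrb : '+f1+' std_logic_vector(axi_data_width/8-1 downto 0);\n',\
-- 			f4+f5+name+f0+'axi_wlast : '+f1+' std_logic;\n',\
-- 			f4+f5+name+f0+'axi_wvalid : '+f1+' std_logic;\n',\
-- 			f4+f5+name+f0+'axi_wready : '+f2+' std_logic;\n',\
-- 			f4+f5+name+f0+'axi_bid : '+f2+' std_logic_vector('+f3+'-1 downto 0);\n',\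
-- 			f4+f5+name+f0+'axi_bresp : '+f2+' std_logic_vector(1 downto 0);\n',\
-- 			f4+f5+name+f0+'axi_bvalid : '+f2+' std_logic;\n',\
-- 			f4+f5+name+f0+'axi_bready : '+f1+' std_logic;\n',\
-- 			f4+f5+name+f0+'axi_arid : '+f1+' std_logic_vector('+f3+'-1 downto 0);\n',\
-- 			f4+f5+name+f0+'axi_araddr : '+f1+' std_logic_vector(axi_address_width-1 downto 0);\n',\
-- 			f4+f5+name+f0+'axi_arlen : '+f1+' std_logic_vector(7 downto 0);\n',\
-- 			f4+f5+name+f0+'axi_arsize : '+f1+' std_logic_vector(2 downto 0);\n',\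
-- 			f4+f5+name+f0+'axi_arburst : '+f1+' std_logic_vector(1 downto 0);\n',\
-- 			f4+f5+name+f0+'axi_arlock : '+f1+' std_logic;\n',\
-- 			f4+f5+name+f0+'axi_arcache : '+f1+' std_logic_vector(3 downto 0);\n',\
-- 			f4+f5+name+f0+'axi_arprot : '+f1+' std_logic_vector(2 downto 0);\n',\
-- 			f4+f5+name+f0+'axi_arqos : '+f1+' std_logic_vector(3 downto 0);\n',\
-- 			f4+f5+name+f0+'axi_arregion : '+f1+' std_logic_vector(3 downto 0);\n',\
-- 			f4+f5+name+f0+'axi_arvalid : '+f1+' std_logic;\n',\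
-- 			f4+f5+name+f0+'axi_arready : '+f2+' std_logic;\n',\
-- 			f4+f5+name+f0+'axi_rid : '+f2+' std_logic_vector('+f3+'-1 downto 0);\n',\
-- 			f4+f5+name+f0+'axi_rdata : '+f2+' std_logic_vector(axi_data_width-1 downto 0);\n',\
-- 			f4+f5+name+f0+'axi_rresp : '+f2+' std_logic_vector(1 downto 0);\n',\
-- 			f4+f5+name+f0+'axi_rlast : '+f2+' std_logic;\n',\
-- 			f4+f5+name+f0+'axi_rvalid : '+f2+' std_logic;\n',\
-- 			f4+f5+name+f0+'axi_rready : '+f1+' std_logic;\n'\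
-- 		]
-- 		formatted_signals.extend(lines)
-- 	return ''.join(formatted_signals)
-- ===== SOURCE B (Python) =====
-- # Table-driven rewrite: one static descriptor table of 39 (suffix, uses_f2, type) rows
-- # replaces the hand-written 39-line literal per name.
-- _W = 'std_logic_vector({}-1 downto 0)'
-- _SL = 'std_logic'
--
-- def _table(f3):
--     idw = _W.format(f3)
--     addr = _W.format('axi_address_width')
--     data = _W.format('axi_data_width')
--     return [
--         ('axi_awid', False, idw),
--         ('axi_awaddr', False, addr),
--         ('axi_awlen', False, 'std_logic_vector(7 downto 0)'),
--         ('axi_awsize', False, 'std_logic_vector(2 downto 0)'),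
--         ('axi_awburst', False, 'std_logic_vector(1 downto 0)'),
--         ('axi_awlock', False, _SL),
--         ('axi_awcache', False, 'std_logic_vector(3 downto 0)'),
--         ('axi_awprot', False, 'std_logic_vector(2 downto 0)'),
--         ('axi_awqos', False, 'std_logic_vector(3 downto 0)'),
--         ('axi_awregion', False, 'std_logic_vector(3 downto 0)'),
--         ('axi_awvalid', False, _SL),
--         ('axi_awready', True, _SL),
--         ('axi_wdata', False, data),
--         ('axi_wstrb', False, 'std_logic_vector(axi_data_width/8-1 downto 0)'),
--         ('axi_wlast', False, _SL),
--         ('axi_wvalid', False, _SL),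
--         ('axi_wready', True, _SL),
--         ('axi_bid', True, idw),
--         ('axi_bresp', True, 'std_logic_vector(1 downto 0)'),
--         ('axi_bvalid', True, _SL),
--         ('axi_bready', False, _SL),
--         ('axi_arid', False, idw),
--         ('axi_araddr', False, addr),
--         ('axi_arlen', False, 'std_logic_vector(7 downto 0)'),
--         ('axi_arsize', False, 'std_logic_vector(2 downto 0)'),
--         ('axi_arburst', False, 'std_logic_vector(1 downto 0)'),
--         ('axi_arlock', False, _SL),
--         ('axi_arcache', False, 'std_logic_vector(3 downto 0)'),
--         ('axi_arprot', False, 'std_logic_vector(2 downto 0)'),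
--         ('axi_arqos', False, 'std_logic_vector(3 downto 0)'),
--         ('axi_arregion', False, 'std_logic_vector(3 downto 0)'),
--         ('axi_arvalid', False, _SL),
--         ('axi_arready', True, _SL),
--         ('axi_rid', True, idw),
--         ('axi_rdata', True, data),
--         ('axi_rresp', True, 'std_logic_vector(1 downto 0)'),
--         ('axi_rlast', True, _SL),
--         ('axi_rvalid', True, _SL),
--         ('axi_rready', False, _SL),
--     ]
--
-- def get_formatted_wrapper_signals(names, ismaster=True, ntabs=1, issignals=False):
--     if ismaster:
--         f0, f1, f2 = '_m_', ' out ', ' in '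
--         f3 = '(clogb2(axi_slave_amount+1)+axi_slave_id_width)'
--     else:
--         f0, f1, f2 = '_s_', ' in ', ' out '
--         f3 = 'axi_slave_id_width'
--     if issignals:
--         f5, f1, f2 = 'signal ', '', ''
--     else:
--         f5 = ''
--     f4 = '\t' * ntabs
--     table = _table(f3)
--     out = []
--     for name in names:
--         for suf, usef2, ty in table:
--             out.append(f4 + f5 + name + f0 + suf + ' : ' + (f2 if usef2 else f1) + ' ' + ty + ';\n')
--     return ''.join(out)
-- ===== Notes on version B (the rewrite author's own statement) =====
-- stated objective: simpler
-- what changed: Replaces A's hand-written 39-element string-literal list per name with a static table of 39 (suffix, direction-flag, type) descriptors rendered by a single formatting loop, and builds the tab prefix by string repetition instead of joining a generator.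
import Mathlib
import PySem

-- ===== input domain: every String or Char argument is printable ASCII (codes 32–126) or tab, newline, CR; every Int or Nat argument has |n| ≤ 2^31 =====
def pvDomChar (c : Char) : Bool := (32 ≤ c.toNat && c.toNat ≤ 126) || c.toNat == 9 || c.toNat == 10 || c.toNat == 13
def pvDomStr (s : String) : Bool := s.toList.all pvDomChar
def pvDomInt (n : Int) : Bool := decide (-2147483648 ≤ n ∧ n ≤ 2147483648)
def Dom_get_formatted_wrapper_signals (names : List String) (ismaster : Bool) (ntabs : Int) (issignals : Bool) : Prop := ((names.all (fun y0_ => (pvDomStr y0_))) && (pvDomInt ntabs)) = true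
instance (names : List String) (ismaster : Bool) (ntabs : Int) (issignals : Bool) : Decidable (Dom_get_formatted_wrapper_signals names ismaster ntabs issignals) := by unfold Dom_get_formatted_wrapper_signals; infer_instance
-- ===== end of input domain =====

-- B replaces A's hand-written 39-line string literal per name with a static table of
-- 39 (suffix, direction-flag, type) descriptors and one formatting loop (objective: simpler).

-- ===== PORT A =====
def get_formatted_wrapper_signals (names : List String) (ismaster : Bool) (ntabs : Int) (issignals : Bool) : String :=
  let f0 := if ismaster then "_m_" else "_s_"
  let f1i := if ismaster then " out " else " in "
  let f2i := if ismaster then " in " else " out "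
  let f3 := if ismaster then "(clogb2(axi_slave_amount+1)+axi_slave_id_width)" else "axi_slave_id_width"
  let f4 := PySem.Str.join "" ((PySem.List.pyRange 0 ntabs 1).map fun _ => "\t")
  let f5 := if issignals then "signal " else ""
  let f1 := if issignals then "" else f1i
  let f2 := if issignals then "" else f2i
  let formatted_signals := names.foldl (fun acc name => acc ++
    [ f4 ++ f5 ++ name ++ f0 ++ "axi_awid : " ++ f1 ++ " std_logic_vector(" ++ f3 ++ "-1 downto 0);\n",
      f4 ++ f5 ++ name ++ f0 ++ "axi_awaddr : " ++ f1 ++ " std_logic_vector(axi_address_width-1 downto 0);\n",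
      f4 ++ f5 ++ name ++ f0 ++ "axi_awlen : " ++ f1 ++ " std_logic_vector(7 downto 0);\n",
      f4 ++ f5 ++ name ++ f0 ++ "axi_awsize : " ++ f1 ++ " std_logic_vector(2 downto 0);\n",
      f4 ++ f5 ++ name ++ f0 ++ "axi_awburst : " ++ f1 ++ " std_logic_vector(1 downto 0);\n",
      f4 ++ f5 ++ name ++ f0 ++ "axi_awlock : " ++ f1 ++ " std_logic;\n",
      f4 ++ f5 ++ name ++ f0 ++ "axi_awcache : " ++ f1 ++ " std_logic_vector(3 downto 0);\n",
      f4 ++ f5 ++ name ++ f0 ++ "axi_awprot : " ++ f1 ++ " std_logic_vector(2 downto 0);\n",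
      f4 ++ f5 ++ name ++ f0 ++ "axi_awqos : " ++ f1 ++ " std_logic_vector(3 downto 0);\n",
      f4 ++ f5 ++ name ++ f0 ++ "axi_awregion : " ++ f1 ++ " std_logic_vector(3 downto 0);\n",
      f4 ++ f5 ++ name ++ f0 ++ "axi_awvalid : " ++ f1 ++ " std_logic;\n",
      f4 ++ f5 ++ name ++ f0 ++ "axi_awready : " ++ f2 ++ " std_logic;\n",
      f4 ++ f5 ++ name ++ f0 ++ "axi_wdata : " ++ f1 ++ " std_logic_vector(axi_data_width-1 downto 0);\n",
      f4 ++ f5 ++ name ++ f0 ++ "axi_wstrb : " ++ f1 ++ " std_logic_vector(axi_data_width/8-1 downto 0);\n",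
      f4 ++ f5 ++ name ++ f0 ++ "axi_wlast : " ++ f1 ++ " std_logic;\n",
      f4 ++ f5 ++ name ++ f0 ++ "axi_wvalid : " ++ f1 ++ " std_logic;\n",
      f4 ++ f5 ++ name ++ f0 ++ "axi_wready : " ++ f2 ++ " std_logic;\n",
      f4 ++ f5 ++ name ++ f0 ++ "axi_bid : " ++ f2 ++ " std_logic_vector(" ++ f3 ++ "-1 downto 0);\n",
      f4 ++ f5 ++ name ++ f0 ++ "axi_bresp : " ++ f2 ++ " std_logic_vector(1 downto 0);\n",
      f4 ++ f5 ++ name ++ f0 ++ "axi_bvalid : " ++ f2 ++ " std_logic;\n",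
      f4 ++ f5 ++ name ++ f0 ++ "axi_bready : " ++ f1 ++ " std_logic;\n",
      f4 ++ f5 ++ name ++ f0 ++ "axi_arid : " ++ f1 ++ " std_logic_vector(" ++ f3 ++ "-1 downto 0);\n",
      f4 ++ f5 ++ name ++ f0 ++ "axi_araddr : " ++ f1 ++ " std_logic_vector(axi_address_width-1 downto 0);\n",
      f4 ++ f5 ++ name ++ f0 ++ "axi_arlen : " ++ f1 ++ " std_logic_vector(7 downto 0);\n",
      f4 ++ f5 ++ name ++ f0 ++ "axi_arsize : " ++ f1 ++ " std_logic_vector(2 downto 0);\n",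
      f4 ++ f5 ++ name ++ f0 ++ "axi_arburst : " ++ f1 ++ " std_logic_vector(1 downto 0);\n",
      f4 ++ f5 ++ name ++ f0 ++ "axi_arlock : " ++ f1 ++ " std_logic;\n",
      f4 ++ f5 ++ name ++ f0 ++ "axi_arcache : " ++ f1 ++ " std_logic_vector(3 downto 0);\n",
      f4 ++ f5 ++ name ++ f0 ++ "axi_arprot : " ++ f1 ++ " std_logic_vector(2 downto 0);\n",
      f4 ++ f5 ++ name ++ f0 ++ "axi_arqos : " ++ f1 ++ " std_logic_vector(3 downto 0);\n",
      f4 ++ f5 ++ name ++ f0 ++ "axi_arregion : " ++ f1 ++ " std_logic_vector(3 downto 0);\n",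
      f4 ++ f5 ++ name ++ f0 ++ "axi_arvalid : " ++ f1 ++ " std_logic;\n",
      f4 ++ f5 ++ name ++ f0 ++ "axi_arready : " ++ f2 ++ " std_logic;\n",
      f4 ++ f5 ++ name ++ f0 ++ "axi_rid : " ++ f2 ++ " std_logic_vector(" ++ f3 ++ "-1 downto 0);\n",
      f4 ++ f5 ++ name ++ f0 ++ "axi_rdata : " ++ f2 ++ " std_logic_vector(axi_data_width-1 downto 0);\n",
      f4 ++ f5 ++ name ++ f0 ++ "axi_rresp : " ++ f2 ++ " std_logic_vector(1 downto 0);\n",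
      f4 ++ f5 ++ name ++ f0 ++ "axi_rlast : " ++ f2 ++ " std_logic;\n",
      f4 ++ f5 ++ name ++ f0 ++ "axi_rvalid : " ++ f2 ++ " std_logic;\n",
      f4 ++ f5 ++ name ++ f0 ++ "axi_rready : " ++ f1 ++ " std_logic;\n" ]) []
  PySem.Str.join "" formatted_signals

-- ===== PORT B =====
-- _W.format(f3) in Source B: the literal split around the '{}' placeholder
def pvW (x : String) : String := "std_logic_vector(" ++ x ++ "-1 downto 0)"

def pvTable (f3 : String) : List (String × Bool × String) :=
  [ ("axi_awid", false, pvW f3),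
    ("axi_awaddr", false, pvW "axi_address_width"),
    ("axi_awlen", false, "std_logic_vector(7 downto 0)"),
    ("axi_awsize", false, "std_logic_vector(2 downto 0)"),
    ("axi_awburst", false, "std_logic_vector(1 downto 0)"),
    ("axi_awlock", false, "std_logic"),
    ("axi_awcache", false, "std_logic_vector(3 downto 0)"),
    ("axi_awprot", false, "std_logic_vector(2 downto 0)"),
    ("axi_awqos", false, "std_logic_vector(3 downto 0)"),
    ("axi_awregion", false, "std_logic_vector(3 downto 0)"),
    ("axi_awvalid", false, "std_logic"),
    ("axi_awready", true, "std_logic"),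
    ("axi_wdata", false, pvW "axi_data_width"),
    ("axi_wstrb", false, "std_logic_vector(axi_data_width/8-1 downto 0)"),
    ("axi_wlast", false, "std_logic"),
    ("axi_wvalid", false, "std_logic"),
    ("axi_wready", true, "std_logic"),
    ("axi_bid", true, pvW f3),
    ("axi_bresp", true, "std_logic_vector(1 downto 0)"),
    ("axi_bvalid", true, "std_logic"),
    ("axi_bready", false, "std_logic"),
    ("axi_arid", false, pvW f3),
    ("axi_araddr", false, pvW "axi_address_width"),
    ("axi_arlen", false, "std_logic_vector(7 downto 0)"),
    ("axi_arsize", false, "std_logic_vector(2 downto 0)"),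
    ("axi_arburst", false, "std_logic_vector(1 downto 0)"),
    ("axi_arlock", false, "std_logic"),
    ("axi_arcache", false, "std_logic_vector(3 downto 0)"),
    ("axi_arprot", false, "std_logic_vector(2 downto 0)"),
    ("axi_arqos", false, "std_logic_vector(3 downto 0)"),
    ("axi_arregion", false, "std_logic_vector(3 downto 0)"),
    ("axi_arvalid", false, "std_logic"),
    ("axi_arready", true, "std_logic"),
    ("axi_rid", true, pvW f3),
    ("axi_rdata", true, pvW "axi_data_width"),
    ("axi_rresp", true, "std_logic_vector(1 downto 0)"),
    ("axi_rlast", true, "std_logic"),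
    ("axi_rvalid", true, "std_logic"),
    ("axi_rready", false, "std_logic") ]

def get_formatted_wrapper_signals_alt (names : List String) (ismaster : Bool) (ntabs : Int) (issignals : Bool) : String :=
  let f0 := if ismaster then "_m_" else "_s_"
  let f3 := if ismaster then "(clogb2(axi_slave_amount+1)+axi_slave_id_width)" else "axi_slave_id_width"
  let f5 := if issignals then "signal " else ""
  let f1 := if issignals then "" else if ismaster then " out " else " in "
  let f2 := if issignals then "" else if ismaster then " in " else " out "
  -- '\t' * ntabs : exact — Python's str*int is empty for ntabs ≤ 0, else ntabs tabs
  let f4 := String.ofList (List.replicate ntabs.toNat '\t')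
  PySem.Str.join "" (names.flatMap (fun name =>
    (pvTable f3).map (fun e =>
      f4 ++ f5 ++ name ++ f0 ++ e.1 ++ " : " ++ (if e.2.1 then f2 else f1) ++ " " ++ e.2.2 ++ ";\n")))

-- ===== PRECONDITION & SPEC =====
def Spec_get_formatted_wrapper_signals (names : List String) (ismaster : Bool) (ntabs : Int) (issignals : Bool) (out : String) : Prop := out = get_formatted_wrapper_signals_alt names ismaster ntabs issignals
instance (names : List String) (ismaster : Bool) (ntabs : Int) (issignals : Bool) (out : String) : Decidable (Spec_get_formatted_wrapper_signals names ismaster ntabs issignals out) := by unfold Spec_get_formatted_wrapper_signals; infer_instance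

-- ===== CLAIM (what is proved, stated in full; the proofs are below) =====
def Claim_equal_get_formatted_wrapper_signals : Prop := ∀ (names : List String) (ismaster : Bool) (ntabs : Int) (issignals : Bool), Dom_get_formatted_wrapper_signals names ismaster ntabs issignals → Spec_get_formatted_wrapper_signals names ismaster ntabs issignals (get_formatted_wrapper_signals names ismaster ntabs issignals)

-- ===== LEMMAS AND PROOFS =====

-- merging the space into the adjacent literal, used by pv_lines_eq
theorem pv_sp (X : String) : " " ++ ("std_logic_vector(" ++ X) = " std_logic_vector(" ++ X := by
  rw [← String.append_assoc]; rfl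

-- A's ''.join('\t' for _ in range(ntabs)) equals B's '\t' * ntabs
theorem pv_f4_eq (ntabs : Int) :
    PySem.Str.join "" ((PySem.List.pyRange 0 ntabs 1).map fun _ => "\t")
      = String.ofList (List.replicate ntabs.toNat '\t') := by
  have h := PySem.Chars.join_nil_singletons (List.replicate ntabs.toNat '\t')
  simp [List.map_replicate] at h
  simp [PySem.Str.join, PySem.List.length_pyRange_one, List.map_const', h]

-- the 39 hand-written lines of A are exactly the table rendering of B, per name
theorem pv_lines_eq (f4 f5 name f0 f1 f2 f3 : String) :
    ([ f4 ++ f5 ++ name ++ f0 ++ "axi_awid : " ++ f1 ++ " std_logic_vector(" ++ f3 ++ "-1 downto 0);\n",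
      f4 ++ f5 ++ name ++ f0 ++ "axi_awaddr : " ++ f1 ++ " std_logic_vector(axi_address_width-1 downto 0);\n",
      f4 ++ f5 ++ name ++ f0 ++ "axi_awlen : " ++ f1 ++ " std_logic_vector(7 downto 0);\n",
      f4 ++ f5 ++ name ++ f0 ++ "axi_awsize : " ++ f1 ++ " std_logic_vector(2 downto 0);\n",
      f4 ++ f5 ++ name ++ f0 ++ "axi_awburst : " ++ f1 ++ " std_logic_vector(1 downto 0);\n",
      f4 ++ f5 ++ name ++ f0 ++ "axi_awlock : " ++ f1 ++ " std_logic;\n",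
      f4 ++ f5 ++ name ++ f0 ++ "axi_awcache : " ++ f1 ++ " std_logic_vector(3 downto 0);\n",
      f4 ++ f5 ++ name ++ f0 ++ "axi_awprot : " ++ f1 ++ " std_logic_vector(2 downto 0);\n",
      f4 ++ f5 ++ name ++ f0 ++ "axi_awqos : " ++ f1 ++ " std_logic_vector(3 downto 0);\n",
      f4 ++ f5 ++ name ++ f0 ++ "axi_awregion : " ++ f1 ++ " std_logic_vector(3 downto 0);\n",
      f4 ++ f5 ++ name ++ f0 ++ "axi_awvalid : " ++ f1 ++ " std_logic;\n",
      f4 ++ f5 ++ name ++ f0 ++ "axi_awready : " ++ f2 ++ " std_logic;\n",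
      f4 ++ f5 ++ name ++ f0 ++ "axi_wdata : " ++ f1 ++ " std_logic_vector(axi_data_width-1 downto 0);\n",
      f4 ++ f5 ++ name ++ f0 ++ "axi_wstrb : " ++ f1 ++ " std_logic_vector(axi_data_width/8-1 downto 0);\n",
      f4 ++ f5 ++ name ++ f0 ++ "axi_wlast : " ++ f1 ++ " std_logic;\n",
      f4 ++ f5 ++ name ++ f0 ++ "axi_wvalid : " ++ f1 ++ " std_logic;\n",
      f4 ++ f5 ++ name ++ f0 ++ "axi_wready : " ++ f2 ++ " std_logic;\n",
      f4 ++ f5 ++ name ++ f0 ++ "axi_bid : " ++ f2 ++ " std_logic_vector(" ++ f3 ++ "-1 downto 0);\n",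
      f4 ++ f5 ++ name ++ f0 ++ "axi_bresp : " ++ f2 ++ " std_logic_vector(1 downto 0);\n",
      f4 ++ f5 ++ name ++ f0 ++ "axi_bvalid : " ++ f2 ++ " std_logic;\n",
      f4 ++ f5 ++ name ++ f0 ++ "axi_bready : " ++ f1 ++ " std_logic;\n",
      f4 ++ f5 ++ name ++ f0 ++ "axi_arid : " ++ f1 ++ " std_logic_vector(" ++ f3 ++ "-1 downto 0);\n",
      f4 ++ f5 ++ name ++ f0 ++ "axi_araddr : " ++ f1 ++ " std_logic_vector(axi_address_width-1 downto 0);\n",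
      f4 ++ f5 ++ name ++ f0 ++ "axi_arlen : " ++ f1 ++ " std_logic_vector(7 downto 0);\n",
      f4 ++ f5 ++ name ++ f0 ++ "axi_arsize : " ++ f1 ++ " std_logic_vector(2 downto 0);\n",
      f4 ++ f5 ++ name ++ f0 ++ "axi_arburst : " ++ f1 ++ " std_logic_vector(1 downto 0);\n",
      f4 ++ f5 ++ name ++ f0 ++ "axi_arlock : " ++ f1 ++ " std_logic;\n",
      f4 ++ f5 ++ name ++ f0 ++ "axi_arcache : " ++ f1 ++ " std_logic_vector(3 downto 0);\n",
      f4 ++ f5 ++ name ++ f0 ++ "axi_arprot : " ++ f1 ++ " std_logic_vector(2 downto 0);\n",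
      f4 ++ f5 ++ name ++ f0 ++ "axi_arqos : " ++ f1 ++ " std_logic_vector(3 downto 0);\n",
      f4 ++ f5 ++ name ++ f0 ++ "axi_arregion : " ++ f1 ++ " std_logic_vector(3 downto 0);\n",
      f4 ++ f5 ++ name ++ f0 ++ "axi_arvalid : " ++ f1 ++ " std_logic;\n",
      f4 ++ f5 ++ name ++ f0 ++ "axi_arready : " ++ f2 ++ " std_logic;\n",
      f4 ++ f5 ++ name ++ f0 ++ "axi_rid : " ++ f2 ++ " std_logic_vector(" ++ f3 ++ "-1 downto 0);\n",
      f4 ++ f5 ++ name ++ f0 ++ "axi_rdata : " ++ f2 ++ " std_logic_vector(axi_data_width-1 downto 0);\n",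
      f4 ++ f5 ++ name ++ f0 ++ "axi_rresp : " ++ f2 ++ " std_logic_vector(1 downto 0);\n",
      f4 ++ f5 ++ name ++ f0 ++ "axi_rlast : " ++ f2 ++ " std_logic;\n",
      f4 ++ f5 ++ name ++ f0 ++ "axi_rvalid : " ++ f2 ++ " std_logic;\n",
      f4 ++ f5 ++ name ++ f0 ++ "axi_rready : " ++ f1 ++ " std_logic;\n" ] : List String)
    = (pvTable f3).map (fun e =>
        f4 ++ f5 ++ name ++ f0 ++ e.1 ++ " : " ++ (if e.2.1 then f2 else f1) ++ " " ++ e.2.2 ++ ";\n") := by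
  simp [pvTable, pvW, String.append_assoc, pv_sp]
  simp [← String.append_assoc]

-- ===== VERDICT (by name: the statement is the Claim_ definition above) =====
theorem get_formatted_wrapper_signals_spec : Claim_equal_get_formatted_wrapper_signals := by
  intro names ismaster ntabs issignals _
  show _ = _
  simp only [get_formatted_wrapper_signals, get_formatted_wrapper_signals_alt,
    pv_f4_eq, PySem.List.foldl_append_eq_flatMap, List.nil_append, pv_lines_eq]
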